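-- pv_equiv track=rewrite | github.com/JoHyukJun/algorithm-analysis | source/python/TrichotomyInversion.py | solution
-- ===== SOURCE A (Python) =====
-- def solution(n):
--     answer = 0
--     temp = []
--
--     while (True):
--         if n == 0:
--             break
--
--         d = n % 3
--         n //= 3
--         temp.append(d)
--
--     for i in range(len(temp)):
--         mul = (3 ** (len(temp) - i - 1))
--         answer += (temp[i] * mul)
--
--     return answer
-- ===== SOURCE B (Python) =====
-- def solution(n):
--     answer = 0
--     while n != 0:
--         answer = answer * 3 + n % 3
--         n //= 3
--     return answer
-- ===== Notes on version B (the rewrite author's own statement) =====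
-- stated objective: simpler
-- what changed: Single Horner-style pass (answer = answer*3 + digit) instead of first collecting the base-3 digits in a list and then a second loop summing digit * 3**(len-i-1); the digit list and the explicit power computation disappear.
import Mathlib
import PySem

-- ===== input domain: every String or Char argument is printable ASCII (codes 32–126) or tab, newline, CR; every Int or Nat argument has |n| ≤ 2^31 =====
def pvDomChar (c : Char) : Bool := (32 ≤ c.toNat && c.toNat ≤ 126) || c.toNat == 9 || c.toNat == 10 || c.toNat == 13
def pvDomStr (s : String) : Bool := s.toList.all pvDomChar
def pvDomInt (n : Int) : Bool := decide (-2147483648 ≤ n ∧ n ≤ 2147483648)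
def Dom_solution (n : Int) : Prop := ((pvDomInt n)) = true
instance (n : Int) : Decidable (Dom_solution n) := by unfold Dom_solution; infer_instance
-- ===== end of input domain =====

-- B replaces A's two passes (collect base-3 digits into a list, then sum digit * 3**(len-i-1))
-- by one Horner pass 'answer = answer*3 + n % 3'; objective: simpler. (On negative n both
-- Pythons' while loops never terminate; both ports stop there and agree.)

-- ===== PORT A =====
-- the while loop: collects the base-3 digits, least significant first
def solutionDigits (n : Int) : List Int :=
  if _h : 0 < n then PySem.Int.mod n 3 :: solutionDigits (PySem.Int.floordiv n 3) else []
termination_by n.toNat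
decreasing_by
  rw [PySem.Int.floordiv_eq_ediv_of_pos (by norm_num : (0:Int) < 3)]
  omega

def solution (n : Int) : Int :=
  let temp := solutionDigits n
  (PySem.List.pyRange 0 temp.length 1).foldl
    (fun answer i =>
      answer + PySem.List.pyGetD temp i 0 * 3 ^ ((temp.length : Int) - i - 1).toNat) 0

-- ===== PORT B =====
def solutionHorner (n answer : Int) : Int :=
  if h : 0 < n then solutionHorner (PySem.Int.floordiv n 3) (answer * 3 + PySem.Int.mod n 3)
  else answer
termination_by n.toNat
decreasing_by
  rw [PySem.Int.floordiv_eq_ediv_of_pos (by norm_num : (0:Int) < 3)]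
  omega

def solution_alt (n : Int) : Int := solutionHorner n 0

-- ===== PRECONDITION & SPEC =====
def Spec_solution (n : Int) (out : Int) : Prop := out = solution_alt n
instance (n : Int) (out : Int) : Decidable (Spec_solution n out) := by unfold Spec_solution; infer_instance

-- ===== CLAIM (what is proved, stated in full; the proofs are below) =====
def Claim_equal_solution : Prop := ∀ (n : Int), Dom_solution n → Spec_solution n (solution n)

-- ===== LEMMAS AND PROOFS =====

-- B's loop is the left fold of the Horner step over A's digit list
theorem horner_eq_foldl (n : Int) :
    ∀ ans, solutionHorner n ans = (solutionDigits n).foldl (fun a d => a * 3 + d) ans := by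
  induction n using solutionDigits.induct with
  | case1 n h ih =>
    intro ans
    rw [solutionHorner, solutionDigits, dif_pos h, dif_pos h, List.foldl_cons]
    exact ih _
  | case2 n h =>
    intro ans
    rw [solutionHorner, solutionDigits, dif_neg h, dif_neg h, List.foldl_nil]

theorem horner_shift (l : List Int) :
    ∀ ans, l.foldl (fun a d => a * 3 + d) ans
      = ans * 3 ^ l.length + l.foldl (fun a d => a * 3 + d) 0 := by
  induction l with
  | nil => intro ans; simp
  | cons x l ih =>
    intro ans
    simp only [List.foldl_cons, List.length_cons]
    rw [ih (ans * 3 + x), ih (0 * 3 + x)]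
    ring

theorem foldl_add_shift (g : Nat → Int) (r : List Nat) :
    ∀ c : Int, r.foldl (fun a k => a + g k) c = c + r.foldl (fun a k => a + g k) 0 := by
  induction r with
  | nil => intro c; simp
  | cons k r ih => intro c; simp only [List.foldl_cons]; rw [ih (c + g k), ih (0 + g k)]; ring

-- A's second loop, with Nat indices and Nat exponents
theorem sum_eq_horner (l : List Int) :
    (List.range l.length).foldl (fun a k => a + l.getD k 0 * 3 ^ (l.length - 1 - k)) 0
      = l.foldl (fun a d => a * 3 + d) 0 := by
  induction l with
  | nil => simp
  | cons x l ih =>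
    rw [List.length_cons, List.range_succ_eq_map, List.foldl_cons, List.foldl_map]
    have hfun : (fun (a : Int) (k : Nat) => a + (x :: l).getD k.succ 0 * 3 ^ (l.length + 1 - 1 - k.succ))
        = fun (a : Int) (k : Nat) => a + l.getD k 0 * 3 ^ (l.length - 1 - k) := by
      funext a k
      rw [List.getD_cons_succ, show l.length + 1 - 1 - k.succ = l.length - 1 - k from by omega]
    rw [hfun]
    simp only [List.getD_cons_zero, Nat.add_sub_cancel, Nat.sub_zero]
    calc (List.range l.length).foldl (fun a k => a + l.getD k 0 * 3 ^ (l.length - 1 - k)) (0 + x * 3 ^ l.length)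
        = (0 + x * 3 ^ l.length) + (List.range l.length).foldl (fun a k => a + l.getD k 0 * 3 ^ (l.length - 1 - k)) 0 :=
          foldl_add_shift _ _ _
      _ = x * 3 ^ l.length + l.foldl (fun a d => a * 3 + d) 0 := by rw [ih]; ring
      _ = l.foldl (fun a d => a * 3 + d) x := by rw [horner_shift l x]
      _ = (x :: l).foldl (fun a d => a * 3 + d) 0 := by simp

-- A's range-of-Int fold reduces to the Nat-indexed fold above
theorem solution_eq_sum (n : Int) :
    solution n = (List.range (solutionDigits n).length).foldl
      (fun a k => a + (solutionDigits n).getD k 0 * 3 ^ ((solutionDigits n).length - 1 - k)) 0 := by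
  show (PySem.List.pyRange 0 ((solutionDigits n).length : Int) 1).foldl
      (fun answer i => answer + PySem.List.pyGetD (solutionDigits n) i 0
        * 3 ^ (((solutionDigits n).length : Int) - i - 1).toNat) 0 = _
  set l := solutionDigits n with hl
  rw [PySem.List.pyRange_zero_nat, List.foldl_map]
  congr 1
  funext a k
  rw [PySem.List.pyGetD_natCast]
  congr 1
  have : ((l.length : Int) - (k : Int) - 1).toNat = l.length - 1 - k := by omega
  rw [this]

-- ===== VERDICT (by name: the statement is the Claim_ definition above) =====
theorem solution_spec : Claim_equal_solution := by
  intro n _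
  unfold Spec_solution solution_alt
  rw [horner_eq_foldl, solution_eq_sum, sum_eq_horner]
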